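-- pv_equiv track=rewrite | github.com/Manonisch/Kanalkodierung | binary.py | bitwiseMod
-- ===== SOURCE A (Python) =====
-- def bitwiseMod(a,b):
--     remainder = 0
--     aPlus = a
--     sigBitA = a.bit_length()
--     sigBitB = b.bit_length()
--     while sigBitA >= sigBitB :
--         bPlus = b
--         # get significant bit at 2^63 and 2^6
--         if sigBitA > sigBitB :
--             # -> shift binary sequence b to b' until significant bits align else continue with b' = b
--             shifter = sigBitA - sigBitB
--             bPlus = bPlus << shifter
--         aPlus = aPlus ^ bPlus
--         sigBitA = aPlus.bit_length()
--     remainder = aPlus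
--     return remainder
-- ===== SOURCE B (Python) =====
-- def bitwiseMod(a, b):
--     # Shift-register (CRC-style) division: thread a small remainder over the
--     # dividend's bits MSB->LSB, XORing the UNSHIFTED divisor whenever the
--     # remainder's top cell fills; b is never shifted or realigned.
--     lb = b.bit_length()
--     rem = 0
--     for i in range(a.bit_length() - 1, -1, -1):
--         rem = (rem << 1) ^ ((a >> i) & 1)
--         if (rem >> (lb - 1)) & 1:
--             rem ^= b
--     return rem
-- ===== Notes on version B (the rewrite author's own statement) =====
-- stated objective: alternative
-- what changed: Replaces A's long division, which repeatedly shifts b to align with the full remainder's recomputed MSB, with a CRC-style shift-register: starting from rem=0 it feeds a's bits in MSB-to-LSB, and whenever the bounded remainder's top cell (bit lb-1) fills it XORs the UNSHIFTED b; b is never shifted and no bit_length is recomputed.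
-- outside the precondition, e.g. on bitwiseMod(5, -3): A returns -1, B returns 2; on bitwiseMod(-3, 2): A returns -1, B returns 1; on bitwiseMod(-3, 8): A returns -3, B returns 1
import Mathlib
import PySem

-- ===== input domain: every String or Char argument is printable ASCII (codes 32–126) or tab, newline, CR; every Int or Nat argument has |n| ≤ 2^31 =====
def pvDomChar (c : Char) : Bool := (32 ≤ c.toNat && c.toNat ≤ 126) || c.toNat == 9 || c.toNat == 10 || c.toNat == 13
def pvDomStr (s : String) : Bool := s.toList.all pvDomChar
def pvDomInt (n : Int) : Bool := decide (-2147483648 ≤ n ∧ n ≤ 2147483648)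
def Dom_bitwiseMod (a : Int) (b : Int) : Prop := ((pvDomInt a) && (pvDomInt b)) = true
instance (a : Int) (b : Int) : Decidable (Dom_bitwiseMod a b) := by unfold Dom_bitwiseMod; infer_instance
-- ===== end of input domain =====

-- B replaces A's realign-b-to-the-MSB long division by a CRC-style shift register that feeds
-- a's bits into a bounded remainder and XORs the unshifted b (objective: alternative, same cost).

-- ===== PORT A =====
-- Python int.bit_length(): number of bits of |n|
def pvBitLen (n : Int) : Int := (n.natAbs.size : Int)

-- A's while loop, fuel-totalised: on Pre_ every iteration strictly decreases aPlus.bit_length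
-- (lemma pvStep_size_lt below), so fuel a.bit_length + 1 is proved sufficient; the fuel is a
-- totality guard only, the computation is Python's step for step.
def pvLoopAInt (b : Int) : Nat → Int → Int
  | 0, aPlus => aPlus
  | f+1, aPlus =>
    if pvBitLen aPlus ≥ pvBitLen b then
      let bPlus :=
        if pvBitLen aPlus > pvBitLen b then
          -- shifter = sigBitA - sigBitB (> 0 here, so .toNat is exact)
          Int.shiftLeft b (pvBitLen aPlus - pvBitLen b).toNat
        else b
      pvLoopAInt b f (Int.xor aPlus bPlus)
    else aPlus

def bitwiseMod (a : Int) (b : Int) : Int :=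
  -- remainder = 0; aPlus = a; while …: …; remainder = aPlus; return remainder
  pvLoopAInt b (a.natAbs.size + 1) a

-- ===== PORT B =====
-- Source B: lb = b.bit_length(); rem = 0; for i in range(a.bit_length()-1, -1, -1):
--   rem = (rem << 1) ^ ((a >> i) & 1); if (rem >> (lb-1)) & 1: rem ^= b
-- (.toNat on i and lb-1 is exact on Pre_, where b ≠ 0 forces lb ≥ 1 and every i ≥ 0.)
def pvBody (a : Int) (b : Int) : Int → Int → Int := fun rem i =>
  let r := Int.xor (Int.shiftLeft rem 1) (Int.land (Int.shiftRight a i.toNat) 1)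
  if Int.land (Int.shiftRight r (pvBitLen b - 1).toNat) 1 == 1 then Int.xor r b else r

def bitwiseMod_alt (a : Int) (b : Int) : Int :=
  (PySem.List.pyRange (pvBitLen a - 1) (-1) (-1)).foldl (pvBody a b) 0

-- ===== PRECONDITION & SPEC =====
-- A infinite-loops on b = 0 and on scattered negative inputs with no closed-form termination
-- condition (e.g. (-5,3), (13,-3) diverge); where it does terminate on negative operands the
-- negative "remainder" (A(5,-3) = -1, A(-3,2) = -1, A(-3,8) = -3) is an accident of Python's
-- two's-complement XOR that no caller of a GF(2) polynomial mod would specify, so Pre_ restricts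
-- to the natural domain a ≥ 0 with b ≥ 1, or b of larger bit_length (then b ≠ 0 and the division
-- is trivial: the remainder is a itself).
def Pre_bitwiseMod (a : Int) (b : Int) : Prop :=
  0 ≤ a ∧ (0 < b ∨ a.natAbs.size < b.natAbs.size)
instance (a : Int) (b : Int) : Decidable (Pre_bitwiseMod a b) := by unfold Pre_bitwiseMod; infer_instance

def pvWitness_bitwiseMod : Int × Int := (13, 5)

def Spec_bitwiseMod (a : Int) (b : Int) (out : Int) : Prop := out = bitwiseMod_alt a b
instance (a : Int) (b : Int) (out : Int) : Decidable (Spec_bitwiseMod a b out) := by unfold Spec_bitwiseMod; infer_instance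

-- ===== CLAIM (what is proved, stated in full; the proofs are below) =====
def Claim_equal_bitwiseMod : Prop := ∀ (a : Int) (b : Int), Dom_bitwiseMod a b → Pre_bitwiseMod a b → Spec_bitwiseMod a b (bitwiseMod a b)

-- ===== LEMMAS AND PROOFS =====

-- Nat-level model of A's loop body
def pvStep (b x : Nat) : Nat := x ^^^ (b <<< (x.size - b.size))

def pvLoopA (b : Nat) : Nat → Nat → Nat
  | 0, x => x
  | f+1, x => if b.size ≤ x.size then pvLoopA b f (pvStep b x) else x

theorem pv_testBit_of_bounds (x k : Nat) (h1 : 2^k ≤ x) (h2 : x < 2^(k+1)) : x.testBit k = true := by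
  rw [Nat.testBit_eq_decide_div_mod_eq]
  have h3 : x / 2^k = 1 := by
    rw [pow_succ] at h2
    exact Nat.div_eq_of_lt_le (by omega) (by omega)
  simp [h3]

theorem pv_testBit_top (x : Nat) (hx : 0 < x) : x.testBit (x.size - 1) = true := by
  have hs : 0 < x.size := Nat.size_pos.mpr hx
  have h1 : 2 ^ (x.size - 1) ≤ x := Nat.lt_size.mp (by omega)
  have h2 : x < 2 ^ (x.size - 1 + 1) := by
    have hss : x.size - 1 + 1 = x.size := by omega
    rw [hss]; exact Nat.lt_size_self x
  exact pv_testBit_of_bounds x _ h1 h2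

theorem pv_testBit_lt (x i : Nat) (h : x.testBit i = true) : i < x.size :=
  Nat.lt_size.mpr (Nat.ge_two_pow_of_testBit h)

theorem pvStep_size_lt (b x : Nat) (hb : 0 < b) (h : b.size ≤ x.size) :
    (pvStep b x).size < x.size := by
  have hbs : 0 < b.size := Nat.size_pos.mpr hb
  have hxs : 0 < x.size := lt_of_lt_of_le hbs h
  have hx : 0 < x := Nat.size_pos.mp hxs
  set s := x.size - b.size with hs
  have hsh : (b <<< s).size = x.size := by
    rw [Nat.size_shiftLeft (by omega : b ≠ 0) s]
    omega
  have hshpos : 0 < b <<< s := by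
    rw [Nat.shiftLeft_eq]
    positivity
  have hk : ∀ j, x.size - 1 ≤ j → (x ^^^ (b <<< s)).testBit j = false := by
    intro j hj
    rw [Nat.testBit_xor]
    by_cases hje : j = x.size - 1
    · subst hje
      rw [pv_testBit_top x hx]
      have : (b <<< s).testBit ((b <<< s).size - 1) = true := pv_testBit_top _ hshpos
      rw [hsh] at this
      rw [this]
      rfl
    · have hjx : x.size ≤ j := by omega
      have hx1 : x.testBit j = false :=
        Nat.testBit_lt_two_pow (lt_of_lt_of_le (Nat.lt_size_self x) (Nat.pow_le_pow_right (by norm_num) hjx))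
      have hx2 : (b <<< s).testBit j = false := by
        apply Nat.testBit_lt_two_pow
        have hlt2 : b <<< s < 2 ^ (b <<< s).size := Nat.lt_size_self _
        rw [hsh] at hlt2
        exact lt_of_lt_of_le hlt2 (Nat.pow_le_pow_right (by norm_num) hjx)
      rw [hx1, hx2]
      rfl
  have hlt : x ^^^ (b <<< s) < 2 ^ (x.size - 1) :=
    Nat.lt_pow_two_of_testBit _ (fun i hi => hk i hi)
  have hfin : (x ^^^ (b <<< s)).size ≤ x.size - 1 := Nat.size_le.mpr hlt
  have hpe : pvStep b x = x ^^^ (b <<< s) := by rw [hs]; rfl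
  rw [hpe]
  omega

-- fuel-free canonical long division (A's algorithm as a well-founded recursion)
def pvM (b x : Nat) : Nat :=
  if h : 0 < b ∧ b.size ≤ x.size then pvM b (pvStep b x) else x
termination_by x.size
decreasing_by exact pvStep_size_lt b x h.1 h.2

theorem pvM_unfold (b x : Nat) :
    pvM b x = if 0 < b ∧ b.size ≤ x.size then pvM b (pvStep b x) else x := by
  rw [pvM.eq_def, dite_eq_ite]

theorem pvM_small (b x : Nat) (h : x.size < b.size) : pvM b x = x := by
  rw [pvM_unfold, if_neg (by omega)]

theorem pvLoopA_eq_pvM (b : Nat) (hb : 0 < b) :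
    ∀ (f x : Nat), x.size < f → pvLoopA b f x = pvM b x := by
  intro f
  induction f with
  | zero => intro x hf; omega
  | succ f ih =>
    intro x hf
    by_cases hc : b.size ≤ x.size
    · have := pvStep_size_lt b x hb hc
      rw [show pvLoopA b (f+1) x = pvLoopA b f (pvStep b x) by simp [pvLoopA, hc]]
      rw [ih (pvStep b x) (by omega)]
      conv_rhs => rw [pvM_unfold]
      rw [if_pos ⟨hb, hc⟩]
    · rw [show pvLoopA b (f+1) x = x by simp [pvLoopA, hc]]
      rw [pvM_unfold, if_neg (by omega)]

-- XOR-ing in a shifted copy of b does not change the canonical remainder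
theorem pvM_xor (b : Nat) (hb : 0 < b) :
    ∀ (n x k : Nat), x.size ≤ n → pvM b (x ^^^ (b <<< k)) = pvM b x := by
  have hbs : 0 < b.size := Nat.size_pos.mpr hb
  intro n
  induction n with
  | zero =>
    intro x k hx
    -- x = 0, so x.size = 0 < (b <<< k).size: one unfold of pvM on the xor hits x back
    have hx0 : x = 0 := Nat.size_eq_zero.mp (by omega)
    subst hx0
    have hshsize : ((0:Nat) ^^^ b <<< k).size = b.size + k := by
      rw [Nat.zero_xor, Nat.size_shiftLeft (by omega) k]
    rw [pvM_unfold, if_pos ⟨hb, by omega⟩]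
    have : pvStep b ((0:Nat) ^^^ b <<< k) = 0 := by
      unfold pvStep
      rw [hshsize]
      rw [show b.size + k - b.size = k by omega]
      rw [Nat.zero_xor, Nat.xor_self]
    rw [this]
  | succ n ih =>
    intro x k hx
    rcases lt_trichotomy x.size (b.size + k) with hlt | heq | hgt
    · -- x.size < (b<<<k).size: the xor's top bit is the shift's; one step of pvM undoes the xor
      have hxb : x.testBit (b.size + k - 1) = false :=
        Nat.testBit_lt_two_pow (lt_of_lt_of_le (Nat.lt_size_self x)
          (Nat.pow_le_pow_right (by norm_num) (by omega)))
      have hshpos : 0 < b <<< k := by rw [Nat.shiftLeft_eq]; positivity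
      have hsh : (b <<< k).size = b.size + k := Nat.size_shiftLeft (by omega) k
      have htop : (x ^^^ b <<< k).testBit (b.size + k - 1) = true := by
        rw [Nat.testBit_xor, hxb]
        have := pv_testBit_top (b <<< k) hshpos
        rw [hsh] at this
        rw [this]
        rfl
      have hyub : x ^^^ b <<< k < 2 ^ (b.size + k) := by
        apply Nat.xor_lt_two_pow
        · exact lt_of_lt_of_le (Nat.lt_size_self x) (Nat.pow_le_pow_right (by norm_num) (by omega))
        · rw [← hsh]; exact Nat.lt_size_self _
      have hysize : (x ^^^ b <<< k).size = b.size + k := by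
        have h1 : (x ^^^ b <<< k).size ≤ b.size + k := Nat.size_le.mpr hyub
        have h2 : b.size + k - 1 < (x ^^^ b <<< k).size := pv_testBit_lt _ _ htop
        omega
      rw [pvM_unfold, if_pos ⟨hb, by omega⟩]
      have : pvStep b (x ^^^ b <<< k) = x := by
        unfold pvStep
        rw [hysize, show b.size + k - b.size = k by omega]
        rw [Nat.xor_assoc, Nat.xor_self, Nat.xor_zero]
      rw [this]
    · -- x.size = (b<<<k).size: one step of pvM on x produces exactly the xor
      have hxpos : 0 < x := Nat.size_pos.mp (by omega)
      conv_rhs => rw [pvM_unfold, if_pos ⟨hb, by omega⟩]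
      have : pvStep b x = x ^^^ b <<< k := by
        unfold pvStep
        rw [heq, show b.size + k - b.size = k by omega]
      rw [this]
    · -- x.size > (b<<<k).size: both sides reduce at the same (top) position; recurse
      have hxpos : 0 < x := Nat.size_pos.mp (by omega)
      have hsh : (b <<< k).size = b.size + k := Nat.size_shiftLeft (by omega) k
      have hshlt : b <<< k < 2 ^ (x.size - 1) := by
        have := Nat.lt_size_self (b <<< k)
        rw [hsh] at this
        exact lt_of_lt_of_le this (Nat.pow_le_pow_right (by norm_num) (by omega))
      have htop : (x ^^^ b <<< k).testBit (x.size - 1) = true := by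
        rw [Nat.testBit_xor, pv_testBit_top x hxpos]
        rw [Nat.testBit_lt_two_pow hshlt]
        rfl
      have hyub : x ^^^ b <<< k < 2 ^ x.size := by
        apply Nat.xor_lt_two_pow (Nat.lt_size_self x)
        exact lt_of_lt_of_le hshlt (Nat.pow_le_pow_right (by norm_num) (by omega))
      have hysize : (x ^^^ b <<< k).size = x.size := by
        have h1 : (x ^^^ b <<< k).size ≤ x.size := Nat.size_le.mpr hyub
        have h2 : x.size - 1 < (x ^^^ b <<< k).size := pv_testBit_lt _ _ htop
        omega
      have hstep : (pvStep b x).size < x.size := pvStep_size_lt b x hb (by omega)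
      conv_rhs => rw [pvM_unfold, if_pos ⟨hb, by omega⟩]
      conv_lhs => rw [pvM_unfold]
      rw [if_pos ⟨hb, by rw [hysize]; omega⟩]
      have hy : pvStep b (x ^^^ b <<< k) = pvStep b x ^^^ b <<< k := by
        unfold pvStep
        rw [hysize]
        rw [Nat.xor_assoc, Nat.xor_comm (b <<< k), ← Nat.xor_assoc]
      rw [hy]
      exact ih (pvStep b x) k (by omega)

-- Nat-level model of B's shift register: pvShiftReg b a rem n consumes bit positions n-1 … 0 of a
def pvShiftReg (b a : Nat) : Nat → Nat → Nat
  | rem, 0 => rem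
  | rem, n+1 =>
    let r := (rem <<< 1) ^^^ ((a >>> n) &&& 1)
    pvShiftReg b a (if r.testBit (b.size - 1) then r ^^^ b else r) n

theorem pv_shiftLeft_xor (u v k : Nat) : (u ^^^ v) <<< k = (u <<< k) ^^^ (v <<< k) := by
  apply Nat.eq_of_testBit_eq
  intro j
  simp [Nat.testBit_shiftLeft, Nat.testBit_xor, Bool.and_xor_distrib_left]

theorem pv_decomp (rem a n : Nat) :
    (rem <<< (n+1)) ^^^ (a % 2^(n+1)) =
      ((((rem <<< 1) ^^^ ((a >>> n) &&& 1)) <<< n) ^^^ (a % 2^n)) := by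
  apply Nat.eq_of_testBit_eq
  intro j
  rw [Nat.and_one_is_mod, ← pow_one 2]
  simp only [Nat.testBit_xor, Nat.testBit_shiftLeft, Nat.testBit_mod_two_pow,
    Nat.testBit_shiftRight, ge_iff_le]
  rcases lt_trichotomy j n with h | h | h
  · simp [Nat.not_le.mpr h, Nat.not_le.mpr (by omega : j < n + 1), h, (by omega : j < n + 1)]
  · subst h
    simp [Nat.not_le.mpr (by omega : j < j + 1), (by omega : j < j + 1)]
  · have h1 : n + 1 ≤ j := by omega
    have h2 : ¬ j < n + 1 := by omega
    have h3 : ¬ j < n := by omega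
    have h4 : 1 ≤ j - n := by omega
    have h6 : j - n ≠ 0 := by omega
    simp [h1, h2, h3, h4, h6, (by omega : n ≤ j), (by omega : j - n - 1 = j - (n+1))]

theorem pv_rem_bound (b rem bit : Nat) (hb : 0 < b) (hrem : rem < 2^(b.size - 1)) (hbit : bit ≤ 1) :
    (if ((rem <<< 1) ^^^ bit).testBit (b.size - 1) then ((rem <<< 1) ^^^ bit) ^^^ b
     else (rem <<< 1) ^^^ bit) < 2^(b.size - 1) := by
  have hbs : 0 < b.size := Nat.size_pos.mpr hb
  have hr : (rem <<< 1) ^^^ bit < 2 ^ b.size := by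
    apply Nat.xor_lt_two_pow
    · rw [Nat.shiftLeft_eq, pow_one]
      calc rem * 2 < 2^(b.size - 1) * 2 := by omega
        _ = 2 ^ (b.size - 1 + 1) := by rw [pow_succ]
        _ ≤ 2 ^ b.size := Nat.pow_le_pow_right (by norm_num) (by omega)
    · calc bit ≤ 1 := hbit
        _ < 2 ^ b.size := Nat.one_lt_two_pow_iff.mpr (by omega)
  set r := (rem <<< 1) ^^^ bit with hrdef
  by_cases ht : r.testBit (b.size - 1)
  · rw [if_pos ht]
    apply Nat.lt_pow_two_of_testBit
    intro i hi
    rw [Nat.testBit_xor]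
    by_cases hie : i = b.size - 1
    · subst hie
      rw [ht, pv_testBit_top b hb]
      rfl
    · have hib : b.size ≤ i := by omega
      rw [Nat.testBit_lt_two_pow (lt_of_lt_of_le hr (Nat.pow_le_pow_right (by norm_num) hib))]
      rw [Nat.testBit_lt_two_pow (lt_of_lt_of_le (Nat.lt_size_self b) (Nat.pow_le_pow_right (by norm_num) hib))]
      rfl
  · rw [if_neg ht]
    apply Nat.lt_pow_two_of_testBit
    intro i hi
    by_cases hie : i = b.size - 1
    · subst hie
      exact Bool.not_eq_true _ ▸ (by simpa using ht)
    · have hib : b.size ≤ i := by omega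
      exact Nat.testBit_lt_two_pow (lt_of_lt_of_le hr (Nat.pow_le_pow_right (by norm_num) hib))

-- the shift register computes the canonical remainder of its state-so-far plus the unread bits
theorem pvShiftReg_eq (b a : Nat) (hb : 0 < b) :
    ∀ (n rem : Nat), rem < 2^(b.size - 1) →
      pvShiftReg b a rem n = pvM b ((rem <<< n) ^^^ (a % 2^n)) := by
  have hbs : 0 < b.size := Nat.size_pos.mpr hb
  intro n
  induction n with
  | zero =>
    intro rem hrem
    have hsize : rem.size < b.size := by
      have : rem.size ≤ b.size - 1 := Nat.size_le.mpr hrem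
      omega
    rw [show pvShiftReg b a rem 0 = rem from rfl]
    rw [show (rem <<< 0) ^^^ (a % 2^0) = rem by simp [Nat.mod_one]]
    rw [pvM_small b rem hsize]
  | succ n ih =>
    intro rem hrem
    have hbit : (a >>> n) &&& 1 ≤ 1 := Nat.and_le_right
    set r := (rem <<< 1) ^^^ ((a >>> n) &&& 1) with hr
    have hstep : pvShiftReg b a rem (n+1) =
        pvShiftReg b a (if r.testBit (b.size - 1) then r ^^^ b else r) n := rfl
    rw [hstep]
    rw [ih _ (pv_rem_bound b rem _ hb hrem hbit)]
    rw [pv_decomp rem a n, ← hr]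
    by_cases ht : r.testBit (b.size - 1)
    · rw [if_pos ht]
      rw [pv_shiftLeft_xor]
      rw [Nat.xor_assoc, Nat.xor_comm (b <<< n), ← Nat.xor_assoc]
      exact pvM_xor b hb (((r <<< n) ^^^ a % 2^n).size) _ n le_rfl
    · rw [if_neg ht]

theorem pvBitLen_natCast (n : Nat) : pvBitLen (n : Int) = (n.size : Int) := rfl

-- the Int port of A computes the Nat model on nonnegative data
theorem pvLoopAInt_eq (nb : Nat) :
    ∀ (f : Nat) (x : Nat), pvLoopAInt (nb : Int) f (x : Int) = ((pvLoopA nb f x : Nat) : Int) := by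
  intro f
  induction f with
  | zero => intro x; rfl
  | succ f ih =>
    intro x
    by_cases hc : nb.size ≤ x.size
    · have hx' : Int.xor (x : Int)
          (if pvBitLen (x:Int) > pvBitLen (nb:Int) then
            Int.shiftLeft (nb:Int) (pvBitLen (x:Int) - pvBitLen (nb:Int)).toNat
           else (nb:Int)) = ((pvStep nb x : Nat) : Int) := by
        rw [pvBitLen_natCast, pvBitLen_natCast]
        by_cases hlt : nb.size < x.size
        · rw [if_pos (by exact_mod_cast hlt)]
          have htn : ((x.size : Int) - (nb.size : Int)).toNat = x.size - nb.size := by omega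
          rw [htn]
          rfl
        · rw [if_neg (by exact_mod_cast hlt)]
          have hse : x.size - nb.size = 0 := by omega
          unfold pvStep
          rw [hse]
          rfl
      calc pvLoopAInt (nb:Int) (f+1) (x:Int)
          = pvLoopAInt (nb:Int) f ((pvStep nb x : Nat) : Int) := by
            rw [show pvLoopAInt (nb:Int) (f+1) (x:Int) =
              (if pvBitLen (x:Int) ≥ pvBitLen (nb:Int) then
                pvLoopAInt (nb:Int) f (Int.xor (x:Int)
                  (if pvBitLen (x:Int) > pvBitLen (nb:Int) then
                    Int.shiftLeft (nb:Int) (pvBitLen (x:Int) - pvBitLen (nb:Int)).toNat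
                   else (nb:Int)))
               else (x:Int)) from rfl]
            rw [if_pos (by rw [pvBitLen_natCast, pvBitLen_natCast]; exact_mod_cast hc), hx']
        _ = ((pvLoopA nb f (pvStep nb x) : Nat) : Int) := ih _
        _ = ((pvLoopA nb (f+1) x : Nat) : Int) := by rw [show pvLoopA nb (f+1) x = pvLoopA nb f (pvStep nb x) by simp [pvLoopA, hc]]
    · rw [show pvLoopA nb (f+1) x = x by simp [pvLoopA, hc]]
      rw [show pvLoopAInt (nb:Int) (f+1) (x:Int) =
        (if pvBitLen (x:Int) ≥ pvBitLen (nb:Int) then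
          pvLoopAInt (nb:Int) f (Int.xor (x:Int)
            (if pvBitLen (x:Int) > pvBitLen (nb:Int) then
              Int.shiftLeft (nb:Int) (pvBitLen (x:Int) - pvBitLen (nb:Int)).toNat
             else (nb:Int)))
         else (x:Int)) from rfl]
      rw [if_neg (by rw [pvBitLen_natCast, pvBitLen_natCast]; exact_mod_cast hc)]

-- the Int condition "(r >> m) & 1 == 1" is Nat testBit for nonnegative r
theorem pv_cond_testBit (r m : Nat) :
    (Int.land (Int.shiftRight (r:Int) m) 1 == 1) = r.testBit m := by
  rw [show Int.shiftRight (r:Int) m = ((r >>> m : Nat) : Int) from rfl]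
  rw [show Int.land ((r >>> m : Nat) : Int) 1 = (((r >>> m) &&& 1 : Nat) : Int) from rfl]
  rw [Nat.testBit_eq_decide_div_mod_eq, ← Nat.shiftRight_eq_div_pow, Nat.and_one_is_mod]
  rcases Nat.mod_two_eq_zero_or_one (r >>> m) with h | h <;> rw [h] <;> simp

-- B's fold over the countdown range computes the Nat shift register (positive b)
theorem pv_body_eq (na nb rem n : Nat) (hbs : 0 < nb.size) :
    pvBody (na:Int) (nb:Int) ((rem:Nat):Int) ((n:Nat):Int) =
      (((if ((rem <<< 1) ^^^ ((na >>> n) &&& 1)).testBit (nb.size - 1)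
          then ((rem <<< 1) ^^^ ((na >>> n) &&& 1)) ^^^ nb
          else ((rem <<< 1) ^^^ ((na >>> n) &&& 1))) : Nat) : Int) := by
  have hitn : ((n : Nat) : Int).toNat = n := by omega
  simp only [pvBody, pvBitLen_natCast]
  have hmtn : ((nb.size : Int) - 1).toNat = nb.size - 1 := by omega
  simp only [hitn, hmtn]
  simp only [show Int.xor (Int.shiftLeft ((rem:Nat):Int) 1) (Int.land (Int.shiftRight ((na:Nat):Int) n) 1)
      = (((rem <<< 1) ^^^ ((na >>> n) &&& 1) : Nat) : Int) from rfl]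
  simp only [pv_cond_testBit]
  cases ht : ((rem <<< 1) ^^^ ((na >>> n) &&& 1)).testBit (nb.size - 1) with
  | true => rw [if_pos rfl, if_pos rfl]; rfl
  | false => rw [if_neg (by simp), if_neg (by simp)]

theorem pv_fold_eq (na nb : Nat) (hb : 0 < nb) :
    ∀ (n rem : Nat),
      (PySem.List.pyRange ((n : Int) - 1) (-1) (-1)).foldl (pvBody (na:Int) (nb:Int)) ((rem:Nat):Int)
      = ((pvShiftReg nb na rem n : Nat) : Int) := by
  have hbs : 0 < nb.size := Nat.size_pos.mpr hb
  intro n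
  induction n with
  | zero =>
    intro rem
    rw [show ((0:Nat) : Int) - 1 = -1 by norm_num]
    rw [PySem.List.pyRange_neg_one_eq_nil le_rfl]
    rfl
  | succ n ih =>
    intro rem
    have hlt : (-1 : Int) < ((n+1 : Nat) : Int) - 1 := by push_cast; omega
    rw [PySem.List.pyRange_neg_one_cons hlt]
    rw [List.foldl_cons]
    have hie : ((n+1 : Nat) : Int) - 1 = ((n : Nat) : Int) := by push_cast; ring
    rw [hie]
    rw [pv_body_eq na nb rem n hbs]
    rw [ih _]
    rw [show pvShiftReg nb na rem (n+1) =
      pvShiftReg nb na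
        (if ((rem <<< 1) ^^^ ((na >>> n) &&& 1)).testBit (nb.size - 1)
         then ((rem <<< 1) ^^^ ((na >>> n) &&& 1)) ^^^ nb
         else ((rem <<< 1) ^^^ ((na >>> n) &&& 1))) n from rfl]

-- trivial-division case: a ≥ 0 with bit_length(a) < bit_length(b); the register never fires
theorem pv_shift_step (x n : Nat) : ((x >>> (n+1)) <<< 1) ^^^ ((x >>> n) &&& 1) = x >>> n := by
  apply Nat.eq_of_testBit_eq
  intro j
  rw [Nat.and_one_is_mod, ← pow_one 2]
  simp only [Nat.testBit_xor, Nat.testBit_shiftLeft, Nat.testBit_shiftRight,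
    Nat.testBit_mod_two_pow, ge_iff_le]
  cases j with
  | zero => simp
  | succ j =>
    simp [(by omega : 1 ≤ j + 1)]
    congr 1
    omega

theorem pv_body_id (na n : Nat) (b : Int) (hsz : na.size < b.natAbs.size) :
    pvBody (na:Int) b ((na >>> (n+1) : Nat) : Int) ((n:Nat):Int) = ((na >>> n : Nat) : Int) := by
  have hbs : 0 < b.natAbs.size := by omega
  have hitn : ((n : Nat) : Int).toNat = n := by omega
  simp only [pvBody]
  have hmtn : (pvBitLen b - 1).toNat = b.natAbs.size - 1 := by
    unfold pvBitLen; omega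
  simp only [hitn, hmtn]
  simp only [show Int.xor (Int.shiftLeft ((na >>> (n+1) : Nat):Int) 1) (Int.land (Int.shiftRight ((na:Nat):Int) n) 1)
      = ((((na >>> (n+1)) <<< 1) ^^^ ((na >>> n) &&& 1) : Nat) : Int) from rfl]
  simp only [pv_shift_step]
  have hfalse : (na >>> n).testBit (b.natAbs.size - 1) = false := by
    apply Nat.testBit_lt_two_pow
    calc na >>> n ≤ na := Nat.shiftRight_le na n
      _ < 2 ^ na.size := Nat.lt_size_self na
      _ ≤ 2 ^ (b.natAbs.size - 1) := Nat.pow_le_pow_right (by norm_num) (by omega)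
  simp only [pv_cond_testBit, hfalse]
  rw [if_neg (by simp)]

theorem pv_fold_id (na : Nat) (b : Int) (hsz : na.size < b.natAbs.size) :
    ∀ (n : Nat),
      (PySem.List.pyRange ((n : Int) - 1) (-1) (-1)).foldl (pvBody (na:Int) b) ((na >>> n : Nat) : Int)
      = ((na : Nat) : Int) := by
  intro n
  induction n with
  | zero =>
    rw [show ((0:Nat) : Int) - 1 = -1 by norm_num]
    rw [PySem.List.pyRange_neg_one_eq_nil le_rfl]
    simp
  | succ n ih =>
    have hlt : (-1 : Int) < ((n+1 : Nat) : Int) - 1 := by push_cast; omega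
    rw [PySem.List.pyRange_neg_one_cons hlt]
    rw [List.foldl_cons]
    have hie : ((n+1 : Nat) : Int) - 1 = ((n : Nat) : Int) := by push_cast; ring
    rw [hie]
    rw [pv_body_id na n b hsz]
    exact ih

-- ===== VERDICT (by name: the statement is the Claim_ definition above) =====
theorem bitwiseMod_spec : Claim_equal_bitwiseMod := by
  intro a b _ hpre
  unfold Spec_bitwiseMod
  obtain ⟨ha, hcase⟩ := hpre
  set na := a.toNat with hna
  have hae : a = (na : Int) := (Int.toNat_of_nonneg ha).symm
  rcases hcase with hb | hsz
  · -- main case: a ≥ 0, b ≥ 1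
    set nb := b.toNat with hnb
    have hbe : b = (nb : Int) := (Int.toNat_of_nonneg (le_of_lt hb)).symm
    have hnbpos : 0 < nb := by omega
    rw [hae, hbe]
    rw [show bitwiseMod (na:Int) (nb:Int) = pvLoopAInt (nb:Int) ((na:Int).natAbs.size + 1) (na:Int) from rfl]
    rw [show ((na:Int)).natAbs = na from rfl]
    rw [pvLoopAInt_eq nb (na.size + 1) na]
    rw [pvLoopA_eq_pvM nb hnbpos (na.size + 1) na (by omega)]
    rw [show bitwiseMod_alt (na:Int) (nb:Int) =
      (PySem.List.pyRange (pvBitLen (na:Int) - 1) (-1) (-1)).foldl (pvBody (na:Int) (nb:Int)) 0 from rfl]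
    rw [pvBitLen_natCast]
    rw [show (0 : Int) = (((0 : Nat) : Nat) : Int) from rfl]
    rw [pv_fold_eq na nb hnbpos na.size 0]
    rw [pvShiftReg_eq nb na hnbpos na.size 0 (by positivity)]
    congr 2
    rw [Nat.zero_shiftLeft, Nat.zero_xor]
    exact (Nat.mod_eq_of_lt (Nat.lt_size_self na)).symm
  · -- trivial case: bit_length(a) < bit_length(b), both return a
    have hsz' : na.size < b.natAbs.size := by
      rw [hae] at hsz
      simpa using hsz
    have hA : bitwiseMod a b = a := by
      have h1 : ¬ pvBitLen a ≥ pvBitLen b := by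
        unfold pvBitLen; simp only [ge_iff_le, Nat.cast_le]; omega
      rw [show bitwiseMod a b = pvLoopAInt b (a.natAbs.size + 1) a from rfl]
      rw [show pvLoopAInt b (a.natAbs.size + 1) a =
        (if pvBitLen a ≥ pvBitLen b then
          pvLoopAInt b (a.natAbs.size) (Int.xor a
            (if pvBitLen a > pvBitLen b then
              Int.shiftLeft b (pvBitLen a - pvBitLen b).toNat
             else b))
         else a) from rfl]
      rw [if_neg h1]
    have hB : bitwiseMod_alt a b = a := by
      rw [hae]
      rw [show bitwiseMod_alt (na:Int) b =
        (PySem.List.pyRange (pvBitLen (na:Int) - 1) (-1) (-1)).foldl (pvBody (na:Int) b) 0 from rfl]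
      rw [pvBitLen_natCast]
      have h0 : (0 : Int) = ((na >>> na.size : Nat) : Int) := by
        rw [Nat.shiftRight_eq_div_pow, Nat.div_eq_of_lt (Nat.lt_size_self na)]
        rfl
      rw [h0]
      exact pv_fold_id na b hsz' na.size
    rw [hA, hB]
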